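-- pv_equiv track=rewrite | github.com/ReflexoPeru/Bot-Asistencia-RPsoft | bot_asistencia_main/cogs/admin/capacitacion.py | _duration_to_str
-- ===== SOURCE A (Python) =====
-- def _duration_to_str(iso_str: str) -> str:
--     if not iso_str:
--         return "0s"
--     try:
--         iso = iso_str.replace('PT', '')
--         h, m, s = 0, 0, 0
--         num = ''
--         for ch in iso:
--             if ch.isdigit():
--                 num += ch
--             else:
--                 if ch == 'H':
--                     h = int(num or 0)
--                 elif ch == 'M':
--                     m = int(num or 0)
--                 elif ch == 'S':
--                     s = int(num or 0)
--                 num = ''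
--         return f"{h:02d}:{m:02d}:{s:02d}"
--     except Exception:
--         return iso_str
-- ===== SOURCE B (Python) =====
-- def _duration_to_str(iso_str: str) -> str:
--     # Alternative strategy: instead of a forward state machine, scan the reversed
--     # string once per unit ('H','M','S'): at the first (i.e. last in the original)
--     # occurrence of the unit letter, read the digit run that immediately precedes it.
--     if not iso_str:
--         return "0s"
--     rev = iso_str.replace('PT', '')[::-1]
--
--     def val(unit):
--         pos = rev.find(unit)
--         if pos == -1:
--             return 0
--         num = ''
--         for ch in rev[pos + 1:]:
--             if not ch.isdigit():
--                 break
--             num = ch + num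
--         return int(num) if num else 0
--
--     return f"{val('H'):02d}:{val('M'):02d}:{val('S'):02d}"
-- ===== Notes on version B (the rewrite author's own statement) =====
-- stated objective: faster
-- what changed: Instead of A's per-character forward state machine with a digit accumulator, B reverses the string once and, for each unit letter (hours, minutes, seconds), uses str.find to locate its first occurrence in the reversed string (= last in the original) and reads the digit run immediately after it.
import Mathlib
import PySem

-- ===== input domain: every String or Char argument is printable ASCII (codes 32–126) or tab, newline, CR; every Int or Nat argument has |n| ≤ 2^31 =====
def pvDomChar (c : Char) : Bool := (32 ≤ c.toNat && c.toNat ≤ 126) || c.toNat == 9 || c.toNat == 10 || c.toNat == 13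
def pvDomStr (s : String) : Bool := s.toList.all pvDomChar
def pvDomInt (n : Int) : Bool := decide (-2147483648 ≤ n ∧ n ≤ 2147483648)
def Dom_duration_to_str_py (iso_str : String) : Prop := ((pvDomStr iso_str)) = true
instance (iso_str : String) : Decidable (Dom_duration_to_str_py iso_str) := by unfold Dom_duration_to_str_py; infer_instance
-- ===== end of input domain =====

-- B replaces A's per-character forward state machine by find-based extraction on the
-- reversed string (per unit letter: locate it, read the adjacent digit run); the timing
-- run measured B faster (constant factor: C-level find/slice instead of a Python loop).

-- ===== PORT A =====
-- f"{n:02d}": zero-pad str(n) to width 2 (identical f-string in A and B, shared helper)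
def pvPad2 (n : Int) : String := PySem.Str.zfill (PySem.Int.toStr n) 2

-- int(num or 0): num is built from ch.isdigit() chars only, so on the ASCII domain
-- int() always succeeds; the .getD 0 default is unreachable (A's except branch never fires on Dom).
def pvToInt0A (num : List Char) : Int :=
  if num = [] then 0 else (PySem.Int.ofStr? (String.ofList num)).getD 0

-- the for-loop over iso with state (h, m, s, num)
def aLoop : List Char → Int → Int → Int → List Char → Int × Int × Int
  | [], h, m, s, _ => (h, m, s)
  | c :: cs, h, m, s, num =>
    if PySem.Chars.isdigit c then aLoop cs h m s (num ++ [c])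
    else if c = 'H' then aLoop cs (pvToInt0A num) m s []
    else if c = 'M' then aLoop cs h (pvToInt0A num) s []
    else if c = 'S' then aLoop cs h m (pvToInt0A num) []
    else aLoop cs h m s []

def duration_to_str_py (iso_str : String) : String :=
  if iso_str = "" then "0s"
  else
    let iso := PySem.Str.replace iso_str "PT" ""
    let t := aLoop iso.toList 0 0 0 []
    pvPad2 t.1 ++ ":" ++ pvPad2 t.2.1 ++ ":" ++ pvPad2 t.2.2

-- ===== PORT B =====
-- int(num) if num else 0: num holds only ch.isdigit() chars, so on the ASCII domain
-- int() always succeeds; the .getD 0 default is unreachable.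
def pvIntB (num : List Char) : Int :=
  if num = [] then 0 else (PySem.Int.ofStr? (String.ofList num)).getD 0

-- the inner for-loop building num by prepending digits until a non-digit (break)
def bNumAux (acc : List Char) : List Char → List Char
  | [] => acc
  | c :: cs => if PySem.Chars.isdigit c then bNumAux (c :: acc) cs else acc

-- pos = rev.find(unit); digits are read from rev[pos+1:] by the for-loop (bNumAux)
def bVal (unit : Char) (rev : List Char) : Int :=
  let pos := PySem.Chars.find rev [unit]
  if pos = -1 then 0
  else pvIntB (bNumAux [] (PySem.List.slice rev (some (pos + 1)) none))

def duration_to_str_py_alt (iso_str : String) : String :=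
  if iso_str = "" then "0s"
  else
    -- rev = iso_str.replace('PT','')[::-1]; the [::-1] slice never fails, getD "" unreachable
    let rev := ((PySem.Str.slice? (PySem.Str.replace iso_str "PT" "") none none (-1)).getD "").toList
    pvPad2 (bVal 'H' rev) ++ ":" ++ pvPad2 (bVal 'M' rev) ++ ":" ++ pvPad2 (bVal 'S' rev)

-- ===== PRECONDITION & SPEC =====
def Spec_duration_to_str_py (iso_str : String) (out : String) : Prop := out = duration_to_str_py_alt iso_str
instance (iso_str : String) (out : String) : Decidable (Spec_duration_to_str_py iso_str out) := by unfold Spec_duration_to_str_py; infer_instance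

-- ===== CLAIM (what is proved, stated in full; the proofs are below) =====
def Claim_equal_duration_to_str_py : Prop := ∀ (iso_str : String), Dom_duration_to_str_py iso_str → Spec_duration_to_str_py iso_str (duration_to_str_py iso_str)

-- ===== LEMMAS AND PROOFS =====

-- the value A's state machine leaves in the register of unit u, starting from
-- accumulated digits num and current value cur
def gU (u : Char) : List Char → List Char → Int → Int
  | [], _, cur => cur
  | c :: cs, num, cur =>
    if PySem.Chars.isdigit c then gU u cs (num ++ [c]) cur
    else if c = u then gU u cs [] (pvToInt0A num)
    else gU u cs [] cur

-- bVal generalized with a default value for when the unit letter is absent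
def bRecC (u : Char) : List Char → Int → Int
  | [], cur => cur
  | c :: cs, cur => if c = u then pvIntB (bNumAux [] cs) else bRecC u cs cur

theorem pvInt_eq (num : List Char) : pvToInt0A num = pvIntB num := rfl

theorem bRecC_nomatch (u : Char) : ∀ (xs : List Char) (cur : Int),
    (∀ c ∈ xs, c ≠ u) → bRecC u xs cur = cur := by
  intro xs
  induction xs with
  | nil => intro cur _; rfl
  | cons x xs ih =>
    intro cur hx
    have h1 : x ≠ u := hx x (by simp)
    simp [bRecC, h1, ih cur (fun c hc => hx c (by simp [hc]))]

theorem bRecC_hit (u : Char) (tl : List Char) : ∀ (xs : List Char) (cur : Int),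
    (∀ c ∈ xs, c ≠ u) → bRecC u (xs ++ u :: tl) cur = pvIntB (bNumAux [] tl) := by
  intro xs
  induction xs with
  | nil => intro cur _; simp [bRecC]
  | cons x xs ih =>
    intro cur hx
    have h1 : x ≠ u := hx x (by simp)
    simp [bRecC, h1, ih cur (fun c hc => hx c (by simp [hc]))]

theorem bRecC_zero (u : Char) (xs : List Char) : bRecC u xs 0 = bVal u xs := by
  unfold bVal
  by_cases h : PySem.Chars.find xs [u] = -1
  · have hno : ¬ [u] <:+: xs := (PySem.Chars.find_eq_neg_one_iff xs [u]).mp h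
    have hne : ∀ c ∈ xs, c ≠ u := by
      intro c hc hcu
      subst hcu
      obtain ⟨s, t, rfl⟩ := List.mem_iff_append.mp hc
      exact hno ⟨s, t, by simp⟩
    simp [h, bRecC_nomatch u xs 0 hne]
  · have hspec := PySem.Chars.findFrom_natCast_spec xs [u] 0 (Nat.zero_le _)
      (by rw [show ((0 : Nat) : Int) = 0 by rfl, PySem.Chars.findFrom_zero]; exact h)
    rw [show ((0 : Nat) : Int) = 0 by rfl, PySem.Chars.findFrom_zero] at hspec
    obtain ⟨hpos, hpre, hmin⟩ := hspec
    set p := PySem.Chars.find xs [u] with hp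
    obtain ⟨t, ht⟩ := hpre
    have hdrop : List.drop p.toNat xs = u :: t := by simpa using ht.symm
    have hplen : p.toNat < xs.length := by
      by_contra hge
      rw [List.drop_eq_nil_of_le (by omega)] at hdrop
      exact List.cons_ne_nil u t hdrop.symm
    have h2 : List.drop (p.toNat + 1) xs = t := by
      rw [← List.tail_drop, hdrop]
      rfl
    have hxs : xs = List.take p.toNat xs ++ u :: List.drop (p.toNat + 1) xs := by
      conv_lhs => rw [← List.take_append_drop p.toNat xs]
      rw [hdrop, h2]
    have htake : ∀ c ∈ List.take p.toNat xs, c ≠ u := by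
      intro c hc hcu
      subst hcu
      obtain ⟨i, hi, hgi⟩ := List.mem_iff_getElem.mp hc
      have hilt : i < p.toNat := by
        have := hi
        simp [List.length_take] at this
        omega
      have hilen : i < xs.length := by omega
      refine hmin i (Nat.zero_le _) hilt ?_
      rw [List.drop_eq_getElem_cons hilen]
      have : xs[i] = c := by
        have := hgi
        rwa [List.getElem_take] at this
      exact ⟨List.drop (i + 1) xs, by simp [this]⟩
    have hslice : PySem.List.slice xs (some (p + 1)) none = List.drop (p.toNat + 1) xs := by
      rw [PySem.List.slice_from xs (by omega)]
      congr 1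
      omega
    rw [if_neg h, hslice]
    conv_lhs => rw [hxs]
    exact bRecC_hit u (List.drop (p.toNat + 1) xs) (List.take p.toNat xs) 0 htake

theorem aLoop_eq_gU (l : List Char) : ∀ (h m s : Int) (num : List Char),
    aLoop l h m s num = (gU 'H' l num h, gU 'M' l num m, gU 'S' l num s) := by
  induction l with
  | nil => intro h m s num; rfl
  | cons c cs ih =>
    intro h m s num
    by_cases hd : PySem.Chars.isdigit c
    · simp [aLoop, gU, hd, ih]
    · by_cases hH : c = 'H'
      · subst hH; simp [aLoop, gU, hd, ih]
      · by_cases hM : c = 'M'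
        · subst hM; simp [aLoop, gU, hd, ih]
        · by_cases hS : c = 'S'
          · subst hS; simp [aLoop, gU, hd, ih]
          · simp [aLoop, gU, hd, hH, hM, hS, ih]

theorem bNumAux_stop (u' : Char) (hu : PySem.Chars.isdigit u' = false) :
    ∀ (xs : List Char) (acc ds : List Char), bNumAux acc (xs ++ u' :: ds) = bNumAux acc xs := by
  intro xs
  induction xs with
  | nil => intro acc ds; simp [bNumAux, hu]
  | cons x xs ih =>
    intro acc ds
    by_cases hx : PySem.Chars.isdigit x <;> simp [bNumAux, hx, ih]

theorem bNumAux_digits : ∀ (xs : List Char), xs.all PySem.Chars.isdigit →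
    ∀ acc, bNumAux acc xs = xs.reverse ++ acc := by
  intro xs
  induction xs with
  | nil => intro _ acc; rfl
  | cons x xs ih =>
    intro hall acc
    simp only [List.all_cons, Bool.and_eq_true] at hall
    simp [bNumAux, hall.1, ih hall.2]

theorem all_ne_of_digits (u : Char) (hu : PySem.Chars.isdigit u = false)
    (ds : List Char) (hds : ds.all PySem.Chars.isdigit = true) : ∀ c ∈ ds, c ≠ u := by
  intro c hc hcu
  subst hcu
  have := List.all_eq_true.mp hds c hc
  rw [hu] at this
  exact Bool.false_ne_true this

theorem bRecC_append_unit (u : Char) (hu : PySem.Chars.isdigit u = false)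
    (ds : List Char) (hds : ds.all PySem.Chars.isdigit = true) :
    ∀ (xs : List Char) (cur : Int),
      bRecC u (xs ++ u :: ds) cur = bRecC u xs (pvIntB ds.reverse) := by
  intro xs
  induction xs with
  | nil =>
    intro cur
    simp [bRecC, bNumAux_digits ds hds]
  | cons x xs ih =>
    intro cur
    by_cases hx : x = u
    · subst hx
      simp [bRecC, bNumAux_stop x hu, ]
    · simp [bRecC, hx, ih]

theorem bRecC_append_other (u c0 : Char) (hu : PySem.Chars.isdigit u = false)
    (hc : PySem.Chars.isdigit c0 = false) (hne : c0 ≠ u)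
    (ds : List Char) (hds : ds.all PySem.Chars.isdigit = true) :
    ∀ (xs : List Char) (cur : Int),
      bRecC u (xs ++ c0 :: ds) cur = bRecC u xs cur := by
  intro xs
  induction xs with
  | nil =>
    intro cur
    simp [bRecC, hne, bRecC_nomatch u ds cur (all_ne_of_digits u hu ds hds)]
  | cons x xs ih =>
    intro cur
    by_cases hx : x = u
    · subst hx
      simp [bRecC, bNumAux_stop c0 hc]
    · simp [bRecC, hx, ih]

theorem gU_eq_bRecC (u : Char) (hu : PySem.Chars.isdigit u = false) :
    ∀ (l num : List Char) (cur : Int), num.all PySem.Chars.isdigit = true →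
      gU u l num cur = bRecC u (l.reverse ++ num.reverse) cur := by
  intro l
  induction l with
  | nil =>
    intro num cur hnum
    simp [gU]
    exact (bRecC_nomatch u num.reverse cur
      (fun c hc => all_ne_of_digits u hu num.reverse (by simpa using hnum) c hc)).symm
  | cons c cs ih =>
    intro num cur hnum
    by_cases hd : PySem.Chars.isdigit c
    · have : gU u (c :: cs) num cur = gU u cs (num ++ [c]) cur := by simp [gU, hd]
      rw [this, ih (num ++ [c]) cur (by simp_all)]
      simp
    · by_cases hcu : c = u
      · have hd' : PySem.Chars.isdigit c = false := by simpa using hd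
        subst hcu
        have h1 : gU c (c :: cs) num cur = gU c cs [] (pvToInt0A num) := by simp [gU, hd]
        rw [h1, ih [] (pvToInt0A num) (by simp)]
        have h2 : (c :: cs).reverse ++ num.reverse = cs.reverse ++ c :: num.reverse := by simp
        rw [h2, bRecC_append_unit c hd' num.reverse (by simpa using hnum)]
        simp [pvInt_eq]
      · have hd' : PySem.Chars.isdigit c = false := by simpa using hd
        have h1 : gU u (c :: cs) num cur = gU u cs [] cur := by simp [gU, hd, hcu]
        rw [h1, ih [] cur (by simp)]
        have h2 : (c :: cs).reverse ++ num.reverse = cs.reverse ++ c :: num.reverse := by simp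
        rw [h2, bRecC_append_other u c hu hd' hcu num.reverse (by simpa using hnum)]
        simp

theorem bVal_eq_gU (u : Char) (hu : PySem.Chars.isdigit u = false) (l : List Char) :
    bVal u l.reverse = gU u l [] 0 := by
  rw [← bRecC_zero, gU_eq_bRecC u hu l [] 0 (by simp)]
  simp

-- ===== VERDICT (by name: the statement is the Claim_ definition above) =====
theorem duration_to_str_py_spec : Claim_equal_duration_to_str_py := by
  unfold Claim_equal_duration_to_str_py
  intro iso_str _
  unfold Spec_duration_to_str_py duration_to_str_py duration_to_str_py_alt
  by_cases he : iso_str = ""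
  · simp [he]
  · simp only [he, ite_false]
    rw [PySem.Str.slice?_none_none_neg_one]
    simp only [Option.getD_some]
    rw [aLoop_eq_gU]
    have hrev : (String.ofList (PySem.Str.replace iso_str "PT" "").toList.reverse).toList
        = (PySem.Str.replace iso_str "PT" "").toList.reverse := String.toList_ofList
    rw [hrev,
      bVal_eq_gU 'H' (by decide) _, bVal_eq_gU 'M' (by decide) _, bVal_eq_gU 'S' (by decide) _]
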